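-- pv_equiv track=rewrite | github.com/sarabegermy/counts-using-binary-search | hackathon.py | counts_optimized
-- ===== SOURCE A (Python) =====
-- def counts_optimized(a, b):
--     a.sort()
--     res = []
--     include = None
--     for i in range(len(b)):
--         start = 0
--         end = len(a)-1
--         mid_index = (end-start) // 2
--         while(end >= start):
--             if b[i]>=a[mid_index]:
--                 start = mid_index+1
--                 #n += n//2
--                 mid_index = (end + start) // 2
--                 include = True
--             else:
--                 end = mid_index
--                 mid_index = (end + start) // 2
--                 include = False
--                 if start == end:
--                     #mid_index = mid_index-1
--                     break
--
--         if include: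
--             res.append(mid_index+1)
--         else:
--             res.append(mid_index)
--
--     return res
-- ===== SOURCE B (Python) =====
-- def counts_optimized(a, b):
--     a.sort()
--     res = [0] * len(b)
--     j = 0
--     for q, i in sorted(((q, i) for i, q in enumerate(b)), key=lambda p: p[0]):
--         while j < len(a) and a[j] <= q:
--             j += 1
--         res[i] = j
--     return res
-- ===== Notes on version B (the rewrite author's own statement) =====
-- stated objective: faster
-- what changed: Per-query hand-rolled binary search is replaced by sorting the queries (with their original positions) and making one left-to-right two-pointer sweep over sorted a, scattering each count back to its original slot; a is still sorted in place and b is not mutated.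
-- intended difference: When a is empty and b is non-empty, A's search loop never runs and it appends the stale mid index -1 for every query, while B returns the intended count 0 for every query. — e.g. on counts_optimized([], [0]): A returns [-1], B returns [0]
import Mathlib
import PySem

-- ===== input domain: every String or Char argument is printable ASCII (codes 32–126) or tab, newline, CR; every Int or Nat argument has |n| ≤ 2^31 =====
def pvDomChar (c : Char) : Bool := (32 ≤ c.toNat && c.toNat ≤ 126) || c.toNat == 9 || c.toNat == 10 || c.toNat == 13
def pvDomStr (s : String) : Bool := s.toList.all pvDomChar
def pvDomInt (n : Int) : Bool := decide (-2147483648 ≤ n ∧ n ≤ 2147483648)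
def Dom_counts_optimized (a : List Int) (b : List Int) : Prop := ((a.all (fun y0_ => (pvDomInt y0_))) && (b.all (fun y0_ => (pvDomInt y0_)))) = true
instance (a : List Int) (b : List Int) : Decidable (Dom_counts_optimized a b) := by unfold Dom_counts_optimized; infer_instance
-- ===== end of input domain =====

-- B replaces A's per-query hand-rolled binary search by one two-pointer sweep over the
-- sorted array with the queries processed in sorted order (counts scattered back to the
-- original query positions); measured faster by a constant factor. Like A, B sorts the
-- argument a in place (the equivalence proved here is about the return value); b is not mutated.


-- ===== PORT A =====
-- A's while-loop; fuel (s.length + 1 at the call site) only makes the recursion structural —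
-- it is enough for every reachable state, and on exhaustion it returns like the normal exit.
-- Python's a[mid_index] is indexed here with pyGetD default 0: on every state the loop
-- actually reaches, mid is a valid nonnegative index, so the default is never read.
def pyLoopA (s : List Int) (q : Int) : Nat → Int → Int → Int → Option Bool → Int × Option Bool
  | 0, _, _, mid, inc => (mid, inc)
  | fuel+1, start, e, mid, inc =>
    if e ≥ start then
      if q ≥ PySem.List.pyGetD s mid 0 then
        pyLoopA s q fuel (mid+1) e (PySem.Int.floordiv (e + (mid+1)) 2) (some true)
      else
        let e' := mid
        let mid' := PySem.Int.floordiv (e' + start) 2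
        if start = e' then (mid', some false)
        else pyLoopA s q fuel start e' mid' (some false)
    else (mid, inc)

def counts_optimized (a : List Int) (b : List Int) : List Int :=
  let s := PySem.List.sorted a (fun x => x) false
  (b.foldl (fun (acc : List Int × Option Bool) q =>
      let start : Int := 0
      let e : Int := (s.length : Int) - 1
      let mid : Int := PySem.Int.floordiv (e - start) 2
      let r := pyLoopA s q (s.length + 1) start e mid acc.2
      (acc.1 ++ [if r.2 = some true then r.1 + 1 else r.1], r.2))
    (([] : List Int), (none : Option Bool))).1

-- ===== PORT B =====
-- 'while j < len(a) and a[j] <= q: j += 1'; fuel (s.length + 1 at every call) only makes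
-- the recursion structural — it cannot run out.
def advanceB (s : List Int) (q : Int) : Nat → Nat → Nat
  | 0, j => j
  | fuel+1, j => if h : j < s.length then (if s[j] ≤ q then advanceB s q fuel (j+1) else j) else j

def counts_optimized_alt (a : List Int) (b : List Int) : List Int :=
  let s := PySem.List.sorted a (fun x => x) false
  let pairs := PySem.List.sorted ((PySem.List.enumerate b).map (fun p => (p.2, p.1))) (fun p => p.1) false
  (pairs.foldl (fun (acc : List Int × Nat) p =>
      let j := advanceB s p.1 (s.length + 1) acc.2
      (PySem.List.pySetD acc.1 p.2 (j : Int), j))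
    (PySem.List.pyRepeat [0] (b.length : Int), 0)).1

-- ===== PRECONDITION & SPEC =====
-- When a is empty and b is non-empty, A's search loop never runs, `include` stays None and
-- the stale mid index -1 is appended for every query; B returns the intended count 0 instead.
def D_counts_optimized (a : List Int) (b : List Int) : Prop := a = [] ∧ b ≠ []
instance (a : List Int) (b : List Int) : Decidable (D_counts_optimized a b) := by unfold D_counts_optimized; infer_instance
def Spec_counts_optimized (a : List Int) (b : List Int) (out : List Int) : Prop := ¬ D_counts_optimized a b → out = counts_optimized_alt a b
instance (a : List Int) (b : List Int) (out : List Int) : Decidable (Spec_counts_optimized a b out) := by unfold Spec_counts_optimized; infer_instance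
def pvDiffWitness_counts_optimized : List Int × List Int := ([], [0])
def pvDiffWitnessOut_counts_optimized : (List Int) × (List Int) := ([-1], [0])

-- ===== CLAIM =====
def Claim_unchanged_counts_optimized : Prop := ∀ (a : List Int) (b : List Int), Dom_counts_optimized a b → Spec_counts_optimized a b (counts_optimized a b)
def Claim_changed_counts_optimized : Prop := Dom_counts_optimized (pvDiffWitness_counts_optimized.1) (pvDiffWitness_counts_optimized.2) ∧ D_counts_optimized (pvDiffWitness_counts_optimized.1) (pvDiffWitness_counts_optimized.2) ∧ counts_optimized (pvDiffWitness_counts_optimized.1) (pvDiffWitness_counts_optimized.2) = pvDiffWitnessOut_counts_optimized.1 ∧ counts_optimized_alt (pvDiffWitness_counts_optimized.1) (pvDiffWitness_counts_optimized.2) = pvDiffWitnessOut_counts_optimized.2 ∧ pvDiffWitnessOut_counts_optimized.1 ≠ pvDiffWitnessOut_counts_optimized.2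
def Claim_exact_counts_optimized : Prop := ∀ (a : List Int) (b : List Int), Dom_counts_optimized a b → D_counts_optimized a b → counts_optimized a b ≠ counts_optimized_alt a b

-- ===== LEMMAS AND PROOFS =====

-- the count both programs compute: number of elements of s that are ≤ q
def pvCnt (s : List Int) (q : Int) : Nat := s.countP (fun x => decide (x ≤ q))

lemma pvCnt_mono (s : List Int) {q q' : Int} (h : q ≤ q') : pvCnt s q ≤ pvCnt s q' := by
  apply List.countP_mono_left
  intro x _ hx
  simp only [decide_eq_true_eq] at *
  omega

lemma pairwise_getElem_le (s : List Int) (hs : s.Pairwise (· ≤ ·)) {i j : Nat}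
    (hij : i ≤ j) (hj : j < s.length) : s[i]'(by omega) ≤ s[j] := by
  rcases Nat.lt_or_ge i j with h | h
  · exact (List.pairwise_iff_getElem.mp hs) i j (by omega) hj h
  · have : i = j := by omega
    subst this; rfl

lemma pvCnt_ge (s : List Int) (hs : s.Pairwise (· ≤ ·)) (q : Int) (i : Nat)
    (hi : i < s.length) (h : s[i] ≤ q) : i + 1 ≤ pvCnt s q := by
  have hsplit : pvCnt s q = (s.take (i+1)).countP (fun x => decide (x ≤ q))
      + (s.drop (i+1)).countP (fun x => decide (x ≤ q)) := by
    rw [pvCnt, ← List.countP_append, List.take_append_drop]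
  have hcnt : (s.take (i+1)).countP (fun x => decide (x ≤ q)) = (s.take (i+1)).length := by
    rw [List.countP_eq_length]
    intro x hx
    rw [List.mem_take_iff_getElem] at hx
    obtain ⟨j, hj, rfl⟩ := hx
    have hj' : j < s.length := by omega
    have h1 : s[j] ≤ s[i] := pairwise_getElem_le s hs (by omega) hi
    simp only [decide_eq_true_eq]
    omega
  have hlen : (s.take (i+1)).length = i + 1 := by simp; omega
  omega

lemma pvCnt_le (s : List Int) (hs : s.Pairwise (· ≤ ·)) (q : Int) (i : Nat)
    (hi : i < s.length) (h : q < s[i]) : pvCnt s q ≤ i := by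
  have hsplit : pvCnt s q = (s.take i).countP (fun x => decide (x ≤ q))
      + (s.drop i).countP (fun x => decide (x ≤ q)) := by
    rw [pvCnt, ← List.countP_append, List.take_append_drop]
  have hdrop : (s.drop i).countP (fun x => decide (x ≤ q)) = 0 := by
    rw [List.countP_eq_zero]
    intro x hx
    rw [List.mem_drop_iff_getElem] at hx
    obtain ⟨j, hj, rfl⟩ := hx
    have h1 : s[i] ≤ s[i+j]'(by omega) := pairwise_getElem_le s hs (by omega) (by omega)
    simp only [decide_eq_true_eq]
    omega
  have := List.countP_le_length (l := s.take i) (p := fun x => decide (x ≤ q))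
  have hlen : (s.take i).length ≤ i := by simp
  omega

-- the loop exits immediately (for any fuel) when e < start
lemma pyLoopA_exit (s : List Int) (q : Int) (fuel : Nat) (start e mid : Int) (inc : Option Bool)
    (h : e < start) : pyLoopA s q fuel start e mid inc = (mid, inc) := by
  cases fuel with
  | zero => rfl
  | succ n => simp [pyLoopA, not_le.mpr h]

-- main invariant for A's binary search: start ≤ count ≤ e + 1 and mid the true midpoint
lemma pyLoopA_correct (s : List Int) (hs : s.Pairwise (· ≤ ·)) (q : Int) :
    ∀ (fuel : Nat) (start e mid : Int) (inc : Option Bool),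
    0 ≤ start → e ≤ (s.length : Int) - 1 → start ≤ e →
    mid = PySem.Int.floordiv (start + e) 2 →
    start ≤ (pvCnt s q : Int) → (pvCnt s q : Int) ≤ e + 1 →
    (e - start).toNat < fuel →
    (if (pyLoopA s q fuel start e mid inc).2 = some true
     then (pyLoopA s q fuel start e mid inc).1 + 1
     else (pyLoopA s q fuel start e mid inc).1) = (pvCnt s q : Int) := by
  intro fuel
  induction fuel with
  | zero => intro start e mid inc _ _ _ _ _ _ hf; omega
  | succ n ih =>
    intro start e mid inc h0 hlen hse hmid hc1 hc2 hf
    have hmb := PySem.Int.floordiv_two_mid_bounds (lo := start) (hi := e) hse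
    rw [← hmid] at hmb
    have hmid0 : 0 ≤ mid := by omega
    have hmidlt : mid.toNat < s.length := by omega
    have hget : PySem.List.pyGetD s mid 0 = s[mid.toNat] := by
      apply PySem.List.pyGetD_eq_getElem <;> omega
    rw [pyLoopA]
    rw [if_pos (by omega : e ≥ start)]
    by_cases hcase : q ≥ PySem.List.pyGetD s mid 0
    · rw [if_pos hcase]
      rw [hget] at hcase
      have hge : mid.toNat + 1 ≤ pvCnt s q := pvCnt_ge s hs q mid.toNat hmidlt (by omega)
      rcases Int.lt_or_le e (mid + 1) with hlt | hle
      · have hfe : PySem.Int.floordiv (e + (mid+1)) 2 = e := by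
          have hme : mid = e := by omega
          rw [PySem.Int.floordiv_eq_iff_of_pos (by omega)]
          omega
        rw [pyLoopA_exit _ _ _ _ _ _ _ hlt, hfe]
        norm_num
        omega
      · exact ih (mid+1) e _ (some true) (by omega) hlen hle
          (by rw [Int.add_comm]) (by omega) hc2 (by omega)
    · rw [if_neg hcase]
      rw [hget] at hcase
      rw [not_le] at hcase
      have hle : pvCnt s q ≤ mid.toNat := pvCnt_le s hs q mid.toNat hmidlt hcase
      simp only []
      by_cases heq : start = mid
      · rw [if_pos heq]
        have hfs : PySem.Int.floordiv (mid + start) 2 = start := by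
          rw [PySem.Int.floordiv_eq_iff_of_pos (by omega)]
          omega
        rw [hfs]
        norm_num
        omega
      · rw [if_neg heq]
        have hsm : start < mid := by omega
        have hme : mid < e := by
          rcases Int.lt_or_le mid e with hh | hh
          · exact hh
          · exfalso
            have hme' : mid = e := by omega
            have h2 : e * 2 ≤ start + e := by
              have := (PySem.Int.floordiv_eq_iff_of_pos (a := start + e) (b := 2) (q := e)
                (by omega)).mp (by omega)
              omega
            omega
        exact ih start mid _ (some false) h0 (by omega) (by omega)
          (by rw [Int.add_comm]) hc1 (by omega) (by omega)

-- A on a non-empty array: each query yields its count, independently of the carried include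
lemma foldA (s : List Int) (hs : s.Pairwise (· ≤ ·)) (hne : s ≠ []) :
    ∀ (b : List Int) (acc0 : List Int) (inc0 : Option Bool),
    (b.foldl (fun (acc : List Int × Option Bool) q =>
      let start : Int := 0
      let e : Int := (s.length : Int) - 1
      let mid : Int := PySem.Int.floordiv (e - start) 2
      let r := pyLoopA s q (s.length + 1) start e mid acc.2
      (acc.1 ++ [if r.2 = some true then r.1 + 1 else r.1], r.2)) (acc0, inc0)).1
    = acc0 ++ b.map (fun q => (pvCnt s q : Int)) := by
  have hlen : 1 ≤ s.length := by
    cases s with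
    | nil => exact absurd rfl hne
    | cons x t => simp
  intro b
  induction b with
  | nil => intro acc0 inc0; simp
  | cons q b ih =>
    intro acc0 inc0
    simp only [List.foldl_cons, List.map_cons]
    have hq := pyLoopA_correct s hs q (s.length + 1) 0 ((s.length : Int) - 1)
      (PySem.Int.floordiv (((s.length : Int) - 1) - 0) 2) inc0
      le_rfl le_rfl (by omega)
      (by congr 1; omega)
      (by positivity)
      (by
        have := List.countP_le_length (l := s) (p := fun x => decide (x ≤ q))
        change pvCnt s q ≤ s.length at this
        omega)
      (by omega)
    rw [ih, hq]
    simp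

-- A on the empty array appends the stale mid index -1 per query
lemma foldA_nil :
    ∀ (b : List Int) (acc0 : List Int),
    (b.foldl (fun (acc : List Int × Option Bool) q =>
      let start : Int := 0
      let e : Int := ((([] : List Int).length : Nat) : Int) - 1
      let mid : Int := PySem.Int.floordiv (e - start) 2
      let r := pyLoopA [] q (([] : List Int).length + 1) start e mid acc.2
      (acc.1 ++ [if r.2 = some true then r.1 + 1 else r.1], r.2)) (acc0, none)).1
    = acc0 ++ b.map (fun _ => (-1 : Int)) := by
  intro b
  induction b with
  | nil => intro acc0; simp
  | cons q b ih =>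
    intro acc0
    simp only [List.foldl_cons, List.map_cons]
    rw [show pyLoopA [] q (([] : List Int).length + 1) 0 (((([] : List Int).length : Nat) : Int) - 1)
        (PySem.Int.floordiv ((((([] : List Int).length : Nat) : Int) - 1) - 0) 2) none
        = (PySem.Int.floordiv (-1) 2, none) from by simp [pyLoopA]]
    have hm : PySem.Int.floordiv (-1) 2 = -1 := by decide
    rw [hm, ih]
    simp

lemma advanceB_correct (s : List Int) (hs : s.Pairwise (· ≤ ·)) (q : Int) :
    ∀ (fuel j : Nat), j ≤ pvCnt s q → s.length - j < fuel → advanceB s q fuel j = pvCnt s q := by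
  intro fuel
  induction fuel with
  | zero => intro j _ hf; omega
  | succ n ih =>
    intro j hj hf
    have hcl := List.countP_le_length (l := s) (p := fun x => decide (x ≤ q))
    rw [advanceB]
    by_cases hlt : j < s.length
    · rw [dif_pos hlt]
      by_cases hle : s[j] ≤ q
      · rw [if_pos hle]
        exact ih (j+1) (pvCnt_ge s hs q j hlt hle) (by omega)
      · rw [if_neg hle]
        have := pvCnt_le s hs q j hlt (by omega)
        omega
    · rw [dif_neg hlt]
      change pvCnt s q ≤ s.length at hcl
      omega

-- B's sweep over any value-sorted pair list with distinct in-range target slots: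
-- untouched slots keep their value, slot i of a pair (q', i) receives the count for q'
lemma sweepB (s : List Int) (hs : s.Pairwise (· ≤ ·)) :
    ∀ (P : List (Int × Int)) (res : List Int) (j : Nat),
    P.Pairwise (fun p p' => p.1 ≤ p'.1) →
    (∀ p ∈ P, j ≤ pvCnt s p.1) →
    (∀ p ∈ P, ∃ k : Nat, k < res.length ∧ p.2 = (k : Int)) →
    (P.map Prod.snd).Nodup →
    (let out := (P.foldl (fun (acc : List Int × Nat) p =>
        let j := advanceB s p.1 (s.length + 1) acc.2
        (PySem.List.pySetD acc.1 p.2 (j : Int), j)) (res, j)).1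
     out.length = res.length ∧
     (∀ i : Nat, (∀ p ∈ P, p.2 ≠ (i : Int)) → out[i]? = res[i]?) ∧
     (∀ (q' : Int) (i : Nat), (q', (i : Int)) ∈ P → out[i]? = some (pvCnt s q' : Int))) := by
  intro P
  induction P with
  | nil =>
    intro res j _ _ _ _
    exact ⟨rfl, fun i _ => rfl, fun q' i h => absurd h (List.not_mem_nil)⟩
  | cons p0 P' ih =>
    intro res j hpw hj hk hnd
    obtain ⟨k0, hk0, hp02⟩ := hk p0 List.mem_cons_self
    have hadv : advanceB s p0.1 (s.length + 1) j = pvCnt s p0.1 :=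
      advanceB_correct s hs p0.1 _ j (hj p0 List.mem_cons_self) (by omega)
    simp only [List.foldl_cons]
    have hset : PySem.List.pySetD res p0.2 ((advanceB s p0.1 (s.length + 1) j : Nat) : Int)
        = res.set k0 ((pvCnt s p0.1 : Nat) : Int) := by
      rw [hp02, hadv, PySem.List.pySetD_natCast]
    have hpw' : P'.Pairwise (fun p p' => p.1 ≤ p'.1) := hpw.of_cons
    have hhead : ∀ p ∈ P', p0.1 ≤ p.1 := fun p hp => (List.pairwise_cons.mp hpw).1 p hp
    have hj' : ∀ p ∈ P', pvCnt s p0.1 ≤ pvCnt s p.1 := fun p hp => pvCnt_mono s (hhead p hp)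
    have hk' : ∀ p ∈ P', ∃ k : Nat, k < (res.set k0 ((pvCnt s p0.1 : Nat) : Int)).length ∧ p.2 = (k : Int) := by
      intro p hp
      obtain ⟨k, hkl, hpk⟩ := hk p (List.mem_cons_of_mem _ hp)
      exact ⟨k, by simpa using hkl, hpk⟩
    have hnd' : (P'.map Prod.snd).Nodup := (List.nodup_cons.mp hnd).2
    have hnotin : p0.2 ∉ P'.map Prod.snd := (List.nodup_cons.mp hnd).1
    have hrest := ih (res.set k0 ((pvCnt s p0.1 : Nat) : Int)) (pvCnt s p0.1) hpw'
      (fun p hp => hj' p hp) hk' hnd'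
    rw [hadv] at hset ⊢
    rw [hset]
    obtain ⟨hlen, huntouched, hhit⟩ := hrest
    refine ⟨by simpa using hlen, ?_, ?_⟩
    · intro i hi
      have hne : p0.2 ≠ (i : Int) := hi p0 List.mem_cons_self
      rw [huntouched i (fun p hp => hi p (List.mem_cons_of_mem _ hp))]
      rw [List.getElem?_set_ne (by intro hcon; exact hne (by rw [hp02, hcon]))]
    · intro q' i hqi
      rcases List.mem_cons.mp hqi with heq | hmem
      · have hq : q' = p0.1 := by rw [← heq]
        have hik : i = k0 := by
          have : (i : Int) = (k0 : Int) := by rw [← hp02, ← heq]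
          exact_mod_cast this
        subst hq; subst hik
        have hnotouch : ∀ p ∈ P', p.2 ≠ (i : Int) := by
          intro p hp hcon
          have h1 : p0.2 = p.2 := by rw [hp02, hcon]
          exact hnotin (h1 ▸ List.mem_map_of_mem hp)
        rw [huntouched i hnotouch, List.getElem?_set_self hk0]
      · exact hhit q' i hmem

-- B computes the count of elements ≤ q for every query, in the original query order
lemma altB_eq_map (a b : List Int) :
    counts_optimized_alt a b
    = b.map (fun q => (pvCnt (PySem.List.sorted a (fun x => x) false) q : Int)) := by
  have hs : (PySem.List.sorted a (fun x => x) false).Pairwise (· ≤ ·) := by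
    have := PySem.List.sorted_pairwise (xs := a) (key := fun x => x)
    simpa using this
  set s := PySem.List.sorted a (fun x => x) false with hsdef
  set pairs0 := (PySem.List.enumerate b).map (fun p : Int × Int => (p.2, p.1)) with hp0
  set P := PySem.List.sorted pairs0 (fun p => p.1) false with hP
  have hres : PySem.List.pyRepeat ([0] : List Int) (b.length : Int) = List.replicate b.length 0 := by
    rw [PySem.List.pyRepeat_singleton]; simp
  have hmemP : ∀ p, p ∈ P ↔ ∃ (k : Nat) (h : k < b.length), p = (b[k], (k : Int)) := by
    intro p
    rw [hP, PySem.List.mem_sorted, hp0, List.mem_map]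
    constructor
    · rintro ⟨x, hx, rfl⟩
      rw [PySem.List.mem_enumerate_iff] at hx
      obtain ⟨k, hk, rfl⟩ := hx
      exact ⟨k, hk, by simp⟩
    · rintro ⟨k, hk, rfl⟩
      refine ⟨((k : Int), b[k]), ?_, rfl⟩
      rw [PySem.List.mem_enumerate_iff]
      exact ⟨k, hk, by simp⟩
  have hpw : P.Pairwise (fun p p' : Int × Int => p.1 ≤ p'.1) := by
    have := PySem.List.sorted_pairwise (xs := pairs0) (key := fun p : Int × Int => p.1)
    simpa using this
  have hnd : (P.map Prod.snd).Nodup := by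
    have hperm : (P.map Prod.snd).Perm (pairs0.map Prod.snd) :=
      (PySem.List.sorted_perm (xs := pairs0) (key := fun p : Int × Int => p.1) (rev := false)).map _
    apply hperm.nodup_iff.mpr
    rw [hp0, List.map_map]
    have h2 : (Prod.snd ∘ fun p : Int × Int => (p.2, p.1)) = Prod.fst := rfl
    rw [h2]
    have hplt := PySem.List.pairwise_lt_enumerate (xs := b) (s := 0)
    have h3 : (List.map Prod.fst (PySem.List.enumerate b 0)).Pairwise (· < ·) :=
      List.Pairwise.map Prod.fst (fun _ _ h => h) hplt
    exact (h3.imp (fun h => ne_of_lt h))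
  have hsw := sweepB s hs P (List.replicate b.length 0) 0 hpw
    (fun p _ => Nat.zero_le _)
    (by
      intro p hp
      obtain ⟨k, hk, rfl⟩ := (hmemP p).mp hp
      exact ⟨k, by simpa using hk, rfl⟩)
    hnd
  obtain ⟨hlen, _, hhit⟩ := hsw
  unfold counts_optimized_alt
  rw [← hsdef, ← hp0, ← hP, hres]
  apply List.ext_getElem?
  intro k
  by_cases hk : k < b.length
  · rw [hhit b[k] k ((hmemP _).mpr ⟨k, hk, rfl⟩)]
    simp [hk]
  · have h1 : (P.foldl (fun (acc : List Int × Nat) p =>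
        let j := advanceB s p.1 (s.length + 1) acc.2
        (PySem.List.pySetD acc.1 p.2 (j : Int), j)) (List.replicate b.length 0, 0)).1.length ≤ k := by
      rw [hlen]; simp; omega
    rw [List.getElem?_eq_none h1, List.getElem?_eq_none (by simp; omega)]

-- A on a non-empty a, assembled
lemma A_eq_map (a b : List Int) (ha : a ≠ []) :
    counts_optimized a b
    = b.map (fun q => (pvCnt (PySem.List.sorted a (fun x => x) false) q : Int)) := by
  have hs : (PySem.List.sorted a (fun x => x) false).Pairwise (· ≤ ·) := by
    have := PySem.List.sorted_pairwise (xs := a) (key := fun x => x)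
    simpa using this
  have hne : PySem.List.sorted a (fun x => x) false ≠ [] := by
    intro h
    exact ha ((PySem.List.sorted_eq_nil_iff a (fun x => x) false).mp h)
  unfold counts_optimized
  rw [foldA _ hs hne b [] none]
  simp

lemma A_nil (b : List Int) : counts_optimized [] b = b.map (fun _ => (-1 : Int)) := by
  unfold counts_optimized
  rw [show PySem.List.sorted ([] : List Int) (fun x => x) false = [] from rfl]
  rw [foldA_nil b []]
  simp

-- ===== VERDICT =====
theorem counts_optimized_spec : Claim_unchanged_counts_optimized := by
  intro a b _ hD
  by_cases ha : a = []
  · subst ha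
    have hb : b = [] := by
      by_contra hb
      exact hD ⟨rfl, hb⟩
    subst hb
    rfl
  · rw [A_eq_map a b ha, altB_eq_map a b]

theorem counts_optimized_changed : Claim_changed_counts_optimized := by
  unfold Claim_changed_counts_optimized; decide

theorem counts_optimized_tight : Claim_exact_counts_optimized := by
  intro a b _ hD
  obtain ⟨ha, hb⟩ := hD
  subst ha
  rw [A_nil b, altB_eq_map [] b]
  cases b with
  | nil => exact absurd rfl hb
  | cons q t =>
    intro hcon
    simp [pvCnt] at hcon
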